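-- pv_equiv track=rewrite | github.com/Ananth7677/AlphaLens | src/agents/red_flag_agent/flag_aggregator.py | aggregate_flags
-- ===== SOURCE A (Python) =====
-- from typing import List, Dict
--
-- def aggregate_flags(flags: List[dict]) -> Dict[str, List[dict]]:
--     """
--     Aggregate flags by category and severity.
--
--     Returns dict with structure:
--     {
--         "FINANCIAL": {"HIGH": [...], "MEDIUM": [...], "LOW": [...]},
--         "FILING": {"HIGH": [...], "MEDIUM": [...], "LOW": [...]},
--         "GOVERNANCE": {"HIGH": [...], "MEDIUM": [...], "LOW": [...]}
--     }
--     """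
--     categorized = {
--         "FINANCIAL": {"HIGH": [], "MEDIUM": [], "LOW": []},
--         "FILING": {"HIGH": [], "MEDIUM": [], "LOW": []},
--         "GOVERNANCE": {"HIGH": [], "MEDIUM": [], "LOW": []}
--     }
--
--     for flag in flags:
--         category = flag.get("category", "FINANCIAL")
--         severity = flag.get("severity", "MEDIUM")
--
--         if category in categorized and severity in categorized[category]:
--             categorized[category][severity].append(flag)
--
--     return categorized
-- ===== SOURCE B (Python) =====
-- from typing import List, Dict
--
-- CATEGORIES = ("FINANCIAL", "FILING", "GOVERNANCE")
-- SEVERITIES = ("HIGH", "MEDIUM", "LOW")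
--
-- def aggregate_flags(flags: List[dict]) -> Dict[str, List[dict]]:
--     # Inverted traversal: one filtering pass of `flags` per fixed bucket,
--     # instead of one dispatch loop with membership tests and in-place appends.
--     return {
--         cat: {
--             sev: [f for f in flags
--                   if f.get("category", "FINANCIAL") == cat
--                   and f.get("severity", "MEDIUM") == sev]
--             for sev in SEVERITIES
--         }
--         for cat in CATEGORIES
--     }
-- ===== Notes on version B (the rewrite author's own statement) =====
-- stated objective: alternative
-- what changed: Replaces the single dispatch loop that appends into a mutable nested dict with a nested dict comprehension over the nine fixed (category, severity) buckets, each bucket filtering the flag list; traversal is inverted from one pass over flags to one pass per bucket.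
import Mathlib
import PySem

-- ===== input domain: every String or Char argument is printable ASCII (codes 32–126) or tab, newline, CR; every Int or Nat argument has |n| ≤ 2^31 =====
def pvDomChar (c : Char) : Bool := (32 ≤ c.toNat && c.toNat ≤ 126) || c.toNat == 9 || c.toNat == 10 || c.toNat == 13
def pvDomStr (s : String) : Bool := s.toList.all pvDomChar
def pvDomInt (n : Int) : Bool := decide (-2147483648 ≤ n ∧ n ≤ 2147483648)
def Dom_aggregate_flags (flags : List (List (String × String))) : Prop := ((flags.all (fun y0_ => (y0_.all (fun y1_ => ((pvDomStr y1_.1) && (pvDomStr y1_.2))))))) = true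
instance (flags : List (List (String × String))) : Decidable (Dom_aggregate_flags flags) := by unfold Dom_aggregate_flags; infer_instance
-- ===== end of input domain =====

set_option maxRecDepth 4000


-- B buckets by nine filtering passes (one per fixed category/severity pair) instead of A's
-- single dispatch loop appending into a mutable nested dict: alternative decomposition, same result.

-- ===== PORT A =====
-- flag.get(k, dflt) on a dict-valued flag: first-match association lookup (exact, PySem.Dict)
def pvFlagGetD (f : List (String × String)) (k dflt : String) : String :=
  (PySem.Dict.mk f).getD k dflt
-- hand port of `key in d` / `d[key] = …` on the nested categorized dict: exact since that
-- dict's keys are the literal, duplicate-free keys A builds it with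
def pvContains {α : Type} (d : List (String × α)) (k : String) : Bool :=
  d.any (fun p => k == p.1)
def pvAssoc? {α : Type} (d : List (String × α)) (k : String) : Option α :=
  (d.find? (fun p => k == p.1)).map (·.2)
def pvModify {α : Type} (d : List (String × α)) (k : String) (g : α → α) : List (String × α) :=
  d.map (fun p => if k == p.1 then (p.1, g p.2) else p)

def pvInit : List (String × List (String × List (List (String × String)))) :=
  [("FINANCIAL", [("HIGH", []), ("MEDIUM", []), ("LOW", [])]),
   ("FILING",    [("HIGH", []), ("MEDIUM", []), ("LOW", [])]),
   ("GOVERNANCE",[("HIGH", []), ("MEDIUM", []), ("LOW", [])])]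

def pvStepA (categorized : List (String × List (String × List (List (String × String)))))
    (flag : List (String × String)) : List (String × List (String × List (List (String × String)))) :=
  let category := pvFlagGetD flag "category" "FINANCIAL"
  let severity := pvFlagGetD flag "severity" "MEDIUM"
  match pvAssoc? categorized category with
  | none => categorized
  | some inner =>
    if pvContains inner severity then
      pvModify categorized category (fun inn => pvModify inn severity (fun l => l ++ [flag]))
    else categorized

def aggregate_flags (flags : List (List (String × String))) :
    List (String × List (String × List (List (String × String)))) :=
  flags.foldl pvStepA pvInit

-- ===== PORT B =====
def aggregate_flags_alt (flags : List (List (String × String))) :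
    List (String × List (String × List (List (String × String)))) :=
  ["FINANCIAL", "FILING", "GOVERNANCE"].map (fun cat =>
    (cat, ["HIGH", "MEDIUM", "LOW"].map (fun sev =>
      (sev, flags.filter (fun f =>
        (pvFlagGetD f "category" "FINANCIAL" == cat) &&
        (pvFlagGetD f "severity" "MEDIUM" == sev))))))

-- ===== PRECONDITION & SPEC =====
-- DecidableEq built compositionally (plain `infer_instance` exceeds the default synthesis size at this nesting depth)
def pvDE3 : DecidableEq (List (String × List (List (String × String)))) := inferInstance
def pvDE5 : DecidableEq (List (String × List (String × List (List (String × String))))) :=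
  @instDecidableEqList _ (@instDecidableEqProd _ _ _ pvDE3)
def Spec_aggregate_flags (flags : List (List (String × String))) (out : List (String × List (String × List (List (String × String))))) : Prop := out = aggregate_flags_alt flags
instance (flags : List (List (String × String))) (out : List (String × List (String × List (List (String × String))))) : Decidable (Spec_aggregate_flags flags out) := by unfold Spec_aggregate_flags; exact pvDE5 _ _

-- ===== CLAIM (what is proved, stated in full; the proofs are below) =====
def Claim_equal_aggregate_flags : Prop := ∀ (flags : List (List (String × String))), Dom_aggregate_flags flags → Spec_aggregate_flags flags (aggregate_flags flags)

-- ===== LEMMAS AND PROOFS =====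

theorem pvStep_alt (p : List (List (String × String))) (f : List (String × String)) :
    pvStepA (aggregate_flags_alt p) f = aggregate_flags_alt (p ++ [f]) := by
  unfold pvStepA aggregate_flags_alt
  set c := pvFlagGetD f "category" "FINANCIAL" with hc
  set s := pvFlagGetD f "severity" "MEDIUM" with hs
  rcases eq_or_ne c "FINANCIAL" with h1 | h1 <;>
  rcases eq_or_ne c "FILING" with h2 | h2 <;>
  rcases eq_or_ne c "GOVERNANCE" with h3 | h3 <;>
  rcases eq_or_ne s "HIGH" with g1 | g1 <;>
  rcases eq_or_ne s "MEDIUM" with g2 | g2 <;>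
  rcases eq_or_ne s "LOW" with g3 | g3 <;>
  first
  | (exact absurd (h1 ▸ h2 : _) (by decide))
  | (exact absurd (h1 ▸ h3 : _) (by decide))
  | (exact absurd (h2 ▸ h3 : _) (by decide))
  | (exact absurd (g1 ▸ g2 : _) (by decide))
  | (exact absurd (g1 ▸ g3 : _) (by decide))
  | (exact absurd (g2 ▸ g3 : _) (by decide))
  | (simp [pvAssoc?, pvContains, pvModify, List.filter_append, List.filter_cons,
           List.filter_nil, ← hc, ← hs, h1, h2, h3, g1, g2, g3])

theorem pv_alt_nil : aggregate_flags_alt [] = pvInit := by rfl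

theorem pv_fold (l p : List (List (String × String))) :
    l.foldl pvStepA (aggregate_flags_alt p) = aggregate_flags_alt (p ++ l) := by
  induction l generalizing p with
  | nil => simp
  | cons f t ih =>
      simp only [List.foldl_cons, pvStep_alt]
      rw [ih (p ++ [f])]
      simp

-- ===== VERDICT (by name: the statement is the Claim_ definition above) =====
theorem aggregate_flags_spec : Claim_equal_aggregate_flags := by
  intro flags _
  show aggregate_flags flags = aggregate_flags_alt flags
  rw [aggregate_flags, ← pv_alt_nil, pv_fold]
  simp
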